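-- pv_equiv track=rewrite | github.com/Ebang213/PharmaForge_O | app/services/epcis_validate.py | validate_epc_format
-- ===== SOURCE A (Python) =====
-- def validate_epc_format(epc: str) -> bool:
--     """Validate EPC URN format."""
--     if not epc:
--         return False
--
--     # Valid patterns
--     valid_patterns = [
--         "urn:epc:id:sgtin:",
--         "urn:epc:id:sscc:",
--         "urn:epc:id:sgln:",
--         "urn:epc:id:grai:",
--         "urn:epc:id:giai:",
--         "urn:epc:class:lgtin:",
--     ]
--
--     # Check if matches any pattern
--     for pattern in valid_patterns:
--         if epc.startswith(pattern):
--             return True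
--
--     # Also accept pure numeric serial numbers for simplified testing
--     if epc.startswith("urn:") or ":" in epc:
--         return True
--
--     return False
-- ===== SOURCE B (Python) =====
-- def validate_epc_format(epc: str) -> bool:
--     # Every accepting branch of the original requires a ':' somewhere in epc,
--     # and any string containing ':' is accepted by its final branch.
--     return ":" in epc
-- ===== Notes on version B (the rewrite author's own statement) =====
-- stated objective: simpler
-- what changed: The prefix-scanning loop over six URN patterns plus the two-part final branch collapses to a single colon-containment test, since every accepting branch both implies and is implied by the presence of a colon in the string.
import Mathlib
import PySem

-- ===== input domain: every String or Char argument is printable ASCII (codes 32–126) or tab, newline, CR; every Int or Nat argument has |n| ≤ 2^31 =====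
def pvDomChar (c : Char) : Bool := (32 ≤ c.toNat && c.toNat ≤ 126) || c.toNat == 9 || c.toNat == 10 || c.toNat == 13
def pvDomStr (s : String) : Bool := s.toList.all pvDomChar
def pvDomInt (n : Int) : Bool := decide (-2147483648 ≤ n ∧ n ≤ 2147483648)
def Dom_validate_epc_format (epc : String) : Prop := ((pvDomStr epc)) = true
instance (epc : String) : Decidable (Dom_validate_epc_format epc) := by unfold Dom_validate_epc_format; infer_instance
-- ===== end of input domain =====

-- B replaces the six-pattern prefix loop and final branch with a single colon-containment test (simpler).


-- ===== PORT A =====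
def validate_epc_format (epc : String) : Bool :=
  if PySem.Str.len epc = 0 then false
  else
    let valid_patterns : List String :=
      ["urn:epc:id:sgtin:", "urn:epc:id:sscc:", "urn:epc:id:sgln:",
       "urn:epc:id:grai:", "urn:epc:id:giai:", "urn:epc:class:lgtin:"]
    -- for-loop with early 'return True' on the first matching prefix
    if valid_patterns.any (fun p => PySem.Str.startswith epc p) then true
    else if PySem.Str.startswith epc "urn:" || PySem.Str.isIn ":" epc then true
    else false

-- ===== PORT B =====
def validate_epc_format_alt (epc : String) : Bool :=
  PySem.Str.isIn ":" epc

-- ===== PRECONDITION & SPEC =====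
def Spec_validate_epc_format (epc : String) (out : Bool) : Prop := out = validate_epc_format_alt epc
instance (epc : String) (out : Bool) : Decidable (Spec_validate_epc_format epc out) := by unfold Spec_validate_epc_format; infer_instance

-- ===== CLAIM (what is proved, stated in full; the proofs are below) =====
def Claim_equal_validate_epc_format : Prop := ∀ (epc : String), Dom_validate_epc_format epc → Spec_validate_epc_format epc (validate_epc_format epc)

-- ===== LEMMAS AND PROOFS =====

-- a prefix containing ':' forces ':' to occur in the string
theorem colon_of_startswith (s p : List Char)
    (h : PySem.Chars.startswith s p = true) (hc : ':' ∈ p) :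
    PySem.Chars.isIn [':'] s = true := by
  rw [PySem.Chars.isIn_iff_infix]
  have hp : p <+: s := (PySem.Chars.startswith_iff (s := s) (p := p)).mp h
  have h1 : [':'] <:+: p := by
    obtain ⟨l, r, rfl⟩ := List.append_of_mem hc
    exact ⟨l, r, by simp⟩
  exact h1.trans hp.isInfix

theorem validate_epc_format_spec : Claim_equal_validate_epc_format := by
  intro epc _
  unfold Spec_validate_epc_format validate_epc_format validate_epc_format_alt
  by_cases hlen : PySem.Str.len epc = 0
  · -- empty string: ':' cannot occur
    have he : epc = "" := by simpa [PySem.Str.len_eq] using hlen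
    subst he
    decide
  · simp only [hlen, if_false]
    by_cases hin : PySem.Chars.isIn [':'] epc.toList = true
    · simp [hin]
    · have hns : ∀ p : List Char, ':' ∈ p → PySem.Chars.startswith epc.toList p = false := by
        intro p hc
        by_contra h
        exact hin (colon_of_startswith epc.toList p (by simpa using h) hc)
      simp only [Bool.not_eq_true] at hin
      simp [hin]
      exact ⟨⟨hns _ (by decide), hns _ (by decide), hns _ (by decide),
        hns _ (by decide), hns _ (by decide), hns _ (by decide)⟩, hns _ (by decide)⟩
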